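-- pv_equiv track=rewrite | github.com/friederrr/AI-hard-human-easy-problems | verifiers/polygons.py | check_concave_vertices
-- ===== SOURCE A (Python) =====
-- from typing import Callable, Iterable
--
-- def check_concave_vertices(concavities: list[int], ks: Iterable[int], expected_vertices: Iterable[int]) -> int | None:
--     ks = list(ks)
--     expected_vertices = set(expected_vertices)
--     valid_k = None
--     for k in ks:
--         C_k = set(c + k % 5 for c in concavities)
--         if C_k == expected_vertices:
--             valid_k = k
--             break
--
--     return valid_k
-- ===== SOURCE B (Python) =====
-- def check_concave_vertices(concavities, ks, expected_vertices):
--     expected = set(expected_vertices)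
--     # the candidate set depends on k only through k % 5: precompute the 5 answers
--     ok = [{c + r for c in concavities} == expected for r in range(5)]
--     for k in ks:
--         if ok[k % 5]:
--             return k
--     return None
-- ===== Notes on version B (the rewrite author's own statement) =====
-- stated objective: faster
-- what changed: The candidate concavity set depends on k only via k % 5, so B precomputes the 5 residue answers once and then scans ks with an O(1) table lookup instead of rebuilding and comparing a set per k.
import Mathlib
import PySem

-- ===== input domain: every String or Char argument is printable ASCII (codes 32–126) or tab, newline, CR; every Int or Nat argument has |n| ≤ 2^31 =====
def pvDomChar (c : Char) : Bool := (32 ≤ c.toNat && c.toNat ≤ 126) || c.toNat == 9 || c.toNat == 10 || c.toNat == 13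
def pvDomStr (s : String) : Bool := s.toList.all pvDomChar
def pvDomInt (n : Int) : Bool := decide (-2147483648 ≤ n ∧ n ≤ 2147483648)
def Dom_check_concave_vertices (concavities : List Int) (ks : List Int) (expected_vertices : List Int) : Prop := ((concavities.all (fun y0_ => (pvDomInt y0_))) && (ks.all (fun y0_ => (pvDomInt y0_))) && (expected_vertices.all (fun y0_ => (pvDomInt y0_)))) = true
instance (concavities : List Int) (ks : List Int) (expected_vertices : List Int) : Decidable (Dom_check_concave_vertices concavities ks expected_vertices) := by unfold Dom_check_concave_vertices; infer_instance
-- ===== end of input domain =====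

-- B precomputes the match result for the five residues k % 5 once and scans ks with a table lookup,
-- instead of rebuilding and comparing a set for every k (faster in a timing run).


-- ===== PORT A =====
-- the for-loop with break: first k whose shifted set equals expected_vertices
def ccvLoopA (concavities : List Int) (ev : PySem.Set Int) : List Int → Option Int
  | [] => none
  | k :: rest =>
    if PySem.Set.equal (PySem.Set.ofList (concavities.map (fun c => c + PySem.Int.mod k 5))) ev
    then some k else ccvLoopA concavities ev rest

def check_concave_vertices (concavities : List Int) (ks : List Int) (expected_vertices : List Int) : Option Int :=
  ccvLoopA concavities (PySem.Set.ofList expected_vertices) ks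

-- ===== PORT B =====
-- scan ks, looking up the precomputed answer for k % 5
def ccvLoopB (ok : List Bool) : List Int → Option Int
  | [] => none
  | k :: rest =>
    if PySem.List.pyGetD ok (PySem.Int.mod k 5) false then some k else ccvLoopB ok rest

def check_concave_vertices_alt (concavities : List Int) (ks : List Int) (expected_vertices : List Int) : Option Int :=
  let expected := PySem.Set.ofList expected_vertices
  let ok := (PySem.List.pyRange 0 5 1).map
    (fun r => PySem.Set.equal (PySem.Set.ofList (concavities.map (fun c => c + r))) expected)
  ccvLoopB ok ks

-- ===== PRECONDITION & SPEC =====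
def Spec_check_concave_vertices (concavities : List Int) (ks : List Int) (expected_vertices : List Int) (out : Option Int) : Prop := out = check_concave_vertices_alt concavities ks expected_vertices
instance (concavities : List Int) (ks : List Int) (expected_vertices : List Int) (out : Option Int) : Decidable (Spec_check_concave_vertices concavities ks expected_vertices out) := by unfold Spec_check_concave_vertices; infer_instance

-- ===== CLAIM (what is proved, stated in full; the proofs are below) =====
def Claim_equal_check_concave_vertices : Prop := ∀ (concavities : List Int) (ks : List Int) (expected_vertices : List Int), Dom_check_concave_vertices concavities ks expected_vertices → Spec_check_concave_vertices concavities ks expected_vertices (check_concave_vertices concavities ks expected_vertices)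

-- ===== LEMMAS AND PROOFS =====
-- B's table lookup at k % 5 is exactly A's per-k test
lemma ccv_lookup_eq (concavities : List Int) (ev : PySem.Set Int) (k : Int) :
    PySem.List.pyGetD
      ((PySem.List.pyRange 0 5 1).map
        (fun r => PySem.Set.equal (PySem.Set.ofList (concavities.map (fun c => c + r))) ev))
      (PySem.Int.mod k 5) false
    = PySem.Set.equal (PySem.Set.ofList (concavities.map (fun c => c + PySem.Int.mod k 5))) ev := by
  have h0 : (0:Int) ≤ PySem.Int.mod k 5 := PySem.Int.mod_nonneg k (by omega)
  have h1 : PySem.Int.mod k 5 < 5 := PySem.Int.mod_lt k (by omega)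
  rw [PySem.List.pyGetD_map_pyRange_of_nonneg _ 5 _ _ h0 h1]

lemma ccv_loops_eq (concavities : List Int) (ev : PySem.Set Int) (ks : List Int) :
    ccvLoopA concavities ev ks
      = ccvLoopB ((PySem.List.pyRange 0 5 1).map
          (fun r => PySem.Set.equal (PySem.Set.ofList (concavities.map (fun c => c + r))) ev)) ks := by
  induction ks with
  | nil => rfl
  | cons k rest ih =>
    simp only [ccvLoopA, ccvLoopB, ccv_lookup_eq, ih]

-- ===== VERDICT (by name: the statement is the Claim_ definition above) =====
theorem check_concave_vertices_spec : Claim_equal_check_concave_vertices := by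
  intro concavities ks expected_vertices _
  unfold Spec_check_concave_vertices check_concave_vertices check_concave_vertices_alt
  exact ccv_loops_eq concavities (PySem.Set.ofList expected_vertices) ks
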